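-- pv_equiv track=rewrite | github.com/pypi-data/pypi-mirror-368 | packages/simplecadapi/simplecadapi-1.1.2.1.tar.gz/simplecadapi-1.1.2.1/src/simplecadapi/auto_tools/ragflow_sync.py | _split_markdown_by_h2
-- ===== SOURCE A (Python) =====
-- from typing import Dict, List, Optional, Tuple, Any
--
-- def _split_markdown_by_h2(content: str, filename: str) -> List[Dict[str, str]]:
--     """
--     按照二级标题(##)分割markdown文档
--
--     Args:
--         content: markdown文档内容
--         filename: 文件名
--
--     Returns:
--         包含分块信息的字典列表
--     """
--     chunks = []
--
--     # 确保输入参数不为 None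
--     if content is None:
--         content = ''
--     if filename is None:
--         filename = 'unknown'
--
--     lines = content.split('\n')
--     current_chunk = []
--     current_title = ""
--
--     for line in lines:
--         # 检查是否为二级标题
--         if line.startswith('## '):
--             # 如果已有内容，保存上一个块
--             if current_chunk:
--                 chunk_content = '\n'.join(current_chunk).strip()
--                 if chunk_content:
--                     chunks.append({
--                         'title': current_title or f"Section {len(chunks) + 1}",
--                         'content': chunk_content,
--                         'filename': filename
--                     })
--
--             # 开始新块
--             current_title = line[3:].strip()  # 去掉'## '
--             current_chunk = [line]
--         else:
--             current_chunk.append(line)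
--
--     # 添加最后一个块
--     if current_chunk:
--         chunk_content = '\n'.join(current_chunk).strip()
--         if chunk_content:
--             chunks.append({
--                 'title': current_title or f"Section {len(chunks) + 1}",
--                 'content': chunk_content,
--                 'filename': filename
--             })
--
--     # 如果没有找到二级标题，将整个文档作为一个块
--     if not chunks:
--         chunks.append({
--             'title': filename,
--             'content': content.strip(),
--             'filename': filename
--         })
--
--     return chunks
-- ===== SOURCE B (Python) =====
-- def _split_markdown_by_h2(content, filename):
--     if content is None:
--         content = ''
--     if filename is None:
--         filename = 'unknown'
--
--     # Phase 1: partition the lines into segments, cutting before every H2 heading.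
--     # Built back-to-front: a line merges into the following segment unless that
--     # segment begins with a heading line.
--     segs = []
--     for line in reversed(content.split('\n')):
--         if segs and not segs[0][0].startswith('## '):
--             segs[0].insert(0, line)
--         else:
--             segs.insert(0, [line])
--
--     # Phase 2: emit one chunk per segment with non-empty stripped content;
--     # each segment's title comes from its own leading heading line (or '').
--     chunks = []
--     for seg in segs:
--         text = '\n'.join(seg).strip()
--         if not text:
--             continue
--         title = seg[0][3:].strip() if seg[0].startswith('## ') else ''
--         chunks.append({'title': title or f"Section {len(chunks) + 1}",
--                        'content': text,
--                        'filename': filename})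
--
--     if not chunks:
--         chunks.append({'title': filename,
--                        'content': content.strip(),
--                        'filename': filename})
--     return chunks
-- ===== Notes on version B (the rewrite author's own statement) =====
-- stated objective: alternative
-- what changed: A's single stateful pass (running current_chunk/current_title with the flush code duplicated after the loop) is replaced by a two-phase decomposition: first partition the lines into segments cut before each '## ' heading (built back-to-front), then a second pass emits chunks, deriving each segment's title from its own leading line.
import Mathlib
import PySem

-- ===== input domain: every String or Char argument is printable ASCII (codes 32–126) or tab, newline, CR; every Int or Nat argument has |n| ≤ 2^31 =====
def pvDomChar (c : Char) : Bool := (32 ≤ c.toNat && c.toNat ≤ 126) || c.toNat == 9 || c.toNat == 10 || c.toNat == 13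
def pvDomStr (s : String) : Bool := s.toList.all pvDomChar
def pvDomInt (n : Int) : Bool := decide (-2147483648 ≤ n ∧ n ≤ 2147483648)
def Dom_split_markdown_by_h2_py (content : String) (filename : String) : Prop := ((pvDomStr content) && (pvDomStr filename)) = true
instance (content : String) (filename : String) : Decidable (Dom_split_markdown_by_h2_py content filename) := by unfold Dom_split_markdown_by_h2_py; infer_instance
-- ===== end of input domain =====

-- B replaces A's single stateful pass (running chunk + running title + duplicated flush code) by a
-- two-phase decomposition: first partition the lines into segments (built back-to-front, cutting
-- before each '## ' heading), then emit chunks from the segments; objective: alternative.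

-- ===== PORT A =====
-- One chunk dict: {'title': …, 'content': …, 'filename': …}
def pvChunkA (title : String) (n : Nat) (text : String) (fn : String) : List (String × String) :=
  [("title", if title ≠ "" then title else "Section " ++ PySem.Int.toStr ((n : Int) + 1)),
   ("content", text), ("filename", fn)]

-- the body of A's 'for line in lines' loop, state = (chunks, current_chunk, current_title)
def pvStepA (fn : String) (st : List (List (String × String)) × List String × String)
    (line : String) : List (List (String × String)) × List String × String :=
  let (chunks, cur, title) := st
  if PySem.Str.startswith line "## " then
    let chunks :=
      if cur ≠ [] then
        let text := PySem.Str.strip (PySem.Str.join "\n" cur)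
        if text ≠ "" then chunks ++ [pvChunkA title chunks.length text fn] else chunks
      else chunks
    (chunks, [line], PySem.Str.strip (PySem.Str.slice line (some 3) none))
  else (chunks, cur ++ [line], title)

-- the final '# 添加最后一个块' flush after the loop
def pvFinishA (fn : String) (st : List (List (String × String)) × List String × String) :
    List (List (String × String)) :=
  let (chunks, cur, title) := st
  if cur ≠ [] then
    let text := PySem.Str.strip (PySem.Str.join "\n" cur)
    if text ≠ "" then chunks ++ [pvChunkA title chunks.length text fn] else chunks
  else chunks

def split_markdown_by_h2_py (content : String) (filename : String) : List (List (String × String)) :=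
  let lines := (PySem.Str.split? content "\n").getD []
  let chunks := pvFinishA filename (lines.foldl (pvStepA filename) ([], [], ""))
  if chunks = [] then
    [[("title", filename), ("content", PySem.Str.strip content), ("filename", filename)]]
  else chunks

-- ===== PORT B =====
-- phase 1 of Source B: reversed-iteration partition of the lines into segments (structural right fold)
def pvSegsB : List String → List (List String)
  | [] => []
  | l :: ls =>
    match pvSegsB ls with
    | [] => [[l]]
    | s :: ss =>
        if PySem.Str.startswith (s.headD "") "## " = false then (l :: s) :: ss
        else [l] :: s :: ss

-- phase 2 of Source B: emit one chunk per segment with non-empty stripped content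
def pvEmitB (fn : String) (chunks : List (List (String × String))) :
    List (List String) → List (List (String × String))
  | [] => chunks
  | seg :: rest =>
    let text := PySem.Str.strip (PySem.Str.join "\n" seg)
    if text = "" then pvEmitB fn chunks rest
    else
      let title := if PySem.Str.startswith (seg.headD "") "## " then
                     PySem.Str.strip (PySem.Str.slice (seg.headD "") (some 3) none)
                   else ""
      pvEmitB fn
        (chunks ++ [[("title", if title ≠ "" then title else
                        "Section " ++ PySem.Int.toStr ((chunks.length : Int) + 1)),
                     ("content", text), ("filename", fn)]]) rest

def split_markdown_by_h2_py_alt (content : String) (filename : String) : List (List (String × String)) :=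
  let lines := (PySem.Str.split? content "\n").getD []
  let chunks := pvEmitB filename [] (pvSegsB lines)
  if chunks = [] then
    [[("title", filename), ("content", PySem.Str.strip content), ("filename", filename)]]
  else chunks

-- ===== PRECONDITION & SPEC =====
def Spec_split_markdown_by_h2_py (content : String) (filename : String) (out : List (List (String × String))) : Prop := out = split_markdown_by_h2_py_alt content filename
instance (content : String) (filename : String) (out : List (List (String × String))) : Decidable (Spec_split_markdown_by_h2_py content filename out) := by unfold Spec_split_markdown_by_h2_py; infer_instance

-- ===== CLAIM (what is proved, stated in full; the proofs are below) =====
def Claim_equal_split_markdown_by_h2_py : Prop := ∀ (content : String) (filename : String), Dom_split_markdown_by_h2_py content filename → Spec_split_markdown_by_h2_py content filename (split_markdown_by_h2_py content filename)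

-- ===== LEMMAS AND PROOFS =====

-- title A's loop state carries, as a function of the current chunk's lines
def pvTitleOf (cur : List String) : String :=
  if PySem.Str.startswith (cur.headD "") "## " then
    PySem.Str.strip (PySem.Str.slice (cur.headD "") (some 3) none)
  else ""

-- merge a pending block into the segment list (the same rule pvSegsB uses per line)
def pvConsSeg (cur : List String) : List (List String) → List (List String)
  | [] => [cur]
  | s :: ss => if PySem.Str.startswith (s.headD "") "## " = false then (cur ++ s) :: ss
               else cur :: s :: ss

-- the value A's flush leaves in chunks, = B's emission step on the same segment
def pvFlushVal (fn : String) (chunks : List (List (String × String))) (cur : List String) :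
    List (List (String × String)) :=
  if PySem.Str.strip (PySem.Str.join "\n" cur) = "" then chunks
  else chunks ++ [pvChunkA (pvTitleOf cur) chunks.length
                   (PySem.Str.strip (PySem.Str.join "\n" cur)) fn]

theorem pv_join_nil : PySem.Str.strip (PySem.Str.join "\n" ([] : List String)) = "" := by decide

theorem pvTitleOf_nil : pvTitleOf [] = "" := by decide

theorem pvTitleOf_single (l : String) (hb : PySem.Str.startswith l "## " = true) :
    pvTitleOf [l] = PySem.Str.strip (PySem.Str.slice l (some 3) none) := by
  simp at hb
  simp [pvTitleOf, hb]

theorem pvTitleOf_append (cur : List String) (l : String)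
    (hb : PySem.Str.startswith l "## " = false) :
    pvTitleOf (cur ++ [l]) = pvTitleOf cur := by
  simp at hb
  have h0 : PySem.Chars.startswith ([] : List Char) ['#', '#', ' '] = false := by decide
  cases cur <;> simp [pvTitleOf, hb, h0]

theorem pvSegsB_eq (l : String) (ls : List String) :
    pvSegsB (l :: ls) = pvConsSeg [l] (pvSegsB ls) := by
  cases h : pvSegsB ls with
  | nil => simp [pvSegsB, pvConsSeg, h]
  | cons s ss =>
    by_cases hs : PySem.Str.startswith (s.headD "") "## " = false <;>
      · simp at hs
        simp [pvSegsB, pvConsSeg, h, hs]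

theorem pvConsSeg_heading (cur : List String) (l : String) (S : List (List String))
    (hb : PySem.Str.startswith l "## " = true) :
    pvConsSeg cur (pvConsSeg [l] S) = cur :: pvConsSeg [l] S := by
  simp at hb
  cases S with
  | nil => simp [pvConsSeg, hb]
  | cons s ss =>
    by_cases hs : PySem.Str.startswith (s.headD "") "## " = false <;>
      · simp at hs
        simp [pvConsSeg, hb, hs]

theorem pvConsSeg_nonheading (cur : List String) (l : String) (S : List (List String))
    (hb : PySem.Str.startswith l "## " = false) :
    pvConsSeg cur (pvConsSeg [l] S) = pvConsSeg (cur ++ [l]) S := by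
  simp at hb
  cases S with
  | nil => simp [pvConsSeg, hb]
  | cons s ss =>
    by_cases hs : PySem.Str.startswith (s.headD "") "## " = false <;>
      · simp at hs
        simp [pvConsSeg, hb, hs]

theorem pvEmitB_consSeg_nil (fn : String) (chunks : List (List (String × String)))
    (S : List (List String)) : pvEmitB fn chunks (pvConsSeg [] S) = pvEmitB fn chunks S := by
  cases S with
  | nil => simp [pvConsSeg, pvEmitB, pv_join_nil]
  | cons s ss =>
    by_cases hs : PySem.Str.startswith (s.headD "") "## " = false <;>
      · simp at hs
        simp [pvConsSeg, pvEmitB, pv_join_nil, hs]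

-- A's flush of the pending block (as it appears in pvStepA / pvFinishA) equals pvFlushVal
theorem pvFlush_eq (fn : String) (chunks : List (List (String × String))) (cur : List String) :
    (if cur ≠ [] then
       (if PySem.Str.strip (PySem.Str.join "\n" cur) ≠ "" then
          chunks ++ [pvChunkA (pvTitleOf cur) chunks.length
                      (PySem.Str.strip (PySem.Str.join "\n" cur)) fn]
        else chunks)
     else chunks) = pvFlushVal fn chunks cur := by
  cases cur with
  | nil => simp [pvFlushVal, pv_join_nil]
  | cons a as =>
    by_cases h : PySem.Str.strip (PySem.Str.join "\n" (a :: as)) = "" <;> simp [pvFlushVal, h]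

-- B's emission step on segment cur, written against pvFlushVal
theorem pvEmitB_cons (fn : String) (chunks : List (List (String × String)))
    (cur : List String) (S : List (List String)) :
    pvEmitB fn chunks (cur :: S) = pvEmitB fn (pvFlushVal fn chunks cur) S := by
  by_cases h : PySem.Str.strip (PySem.Str.join "\n" cur) = "" <;>
    simp [pvEmitB, pvFlushVal, pvChunkA, pvTitleOf, h]

-- the main loop invariant: A's fold-then-flush equals B's emit over the segment list
theorem pvMain (fn : String) : ∀ (rest : List String) (chunks : List (List (String × String)))
    (cur : List String),
    pvFinishA fn (rest.foldl (pvStepA fn) (chunks, cur, pvTitleOf cur))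
      = pvEmitB fn chunks (pvConsSeg cur (pvSegsB rest)) := by
  intro rest
  induction rest with
  | nil =>
    intro chunks cur
    have h := pvFlush_eq fn chunks cur
    show pvFinishA fn (chunks, cur, pvTitleOf cur) = pvEmitB fn chunks (pvConsSeg cur [])
    rw [show pvConsSeg cur [] = [cur] from rfl, pvEmitB_cons]
    simp only [pvFinishA]
    rw [← h]
    exact (by cases hc : decide (cur = []) <;> simp_all [pvEmitB])
  | cons l ls ih =>
    intro chunks cur
    rw [List.foldl_cons, pvSegsB_eq]
    cases hb : PySem.Str.startswith l "## " with
    | true =>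
      have hstep : pvStepA fn (chunks, cur, pvTitleOf cur) l =
          (pvFlushVal fn chunks cur, [l], pvTitleOf [l]) := by
        have h := pvFlush_eq fn chunks cur
        rw [pvTitleOf_single l hb]
        simp only [pvStepA, hb]
        simp only [← h]
        simp
      rw [hstep, ih, pvConsSeg_heading cur l _ hb, pvEmitB_cons]
    | false =>
      have hstep : pvStepA fn (chunks, cur, pvTitleOf cur) l =
          (chunks, cur ++ [l], pvTitleOf (cur ++ [l])) := by
        rw [pvTitleOf_append cur l hb]
        simp only [pvStepA, hb]
        simp
      rw [hstep, ih, pvConsSeg_nonheading cur l _ hb]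

-- ===== VERDICT (by name: the statement is the Claim_ definition above) =====
theorem split_markdown_by_h2_py_spec : Claim_equal_split_markdown_by_h2_py := by
  intro content filename _
  unfold Spec_split_markdown_by_h2_py split_markdown_by_h2_py split_markdown_by_h2_py_alt
  have h := pvMain filename ((PySem.Str.split? content "\n").getD []) [] []
  rw [pvTitleOf_nil] at h
  rw [pvEmitB_consSeg_nil] at h
  simp only [h]
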